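-- pv_equiv track=rewrite | github.com/htylab/tigerbx | tigerbx/reg.py | _coerce_plan_string
-- ===== SOURCE A (Python) =====
-- def _coerce_plan_string(plan):
--     if plan is None:
--         raise ValueError("Missing registration plan. Example: 'AF' or 'AC'.")
--     if isinstance(plan, (list, tuple)):
--         plan = ''.join(str(x) for x in plan)
--     plan = str(plan).upper()
--     for sep in (' ', ',', '+', '-', '_'):
--         plan = plan.replace(sep, '')
--     if not plan:
--         raise ValueError("Registration plan is empty. Example: 'AF' or 'AC'.")
--     return plan
-- ===== SOURCE B (Python) =====
-- def _coerce_plan_string(plan):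
--     if plan is None:
--         raise ValueError("Missing registration plan. Example: 'AF' or 'AC'.")
--     if isinstance(plan, (list, tuple)):
--         plan = ''.join(str(x) for x in plan)
--     plan = ''.join(ch for ch in str(plan).upper() if ch not in {' ', ',', '+', '-', '_'})
--     if not plan:
--         raise ValueError("Registration plan is empty. Example: 'AF' or 'AC'.")
--     return plan
-- ===== Notes on version B (the rewrite author's own statement) =====
-- stated objective: simpler
-- what changed: Replaces A's five sequential whole-string str.replace passes (one per separator) with a single character-filtering traversal that drops separator characters in one pass.
-- outside the precondition, e.g. on _coerce_plan_string(None): A raises ValueError, B raises ValueError; on _coerce_plan_string(' ,+-_'): A raises ValueError, B raises ValueError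
import Mathlib
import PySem

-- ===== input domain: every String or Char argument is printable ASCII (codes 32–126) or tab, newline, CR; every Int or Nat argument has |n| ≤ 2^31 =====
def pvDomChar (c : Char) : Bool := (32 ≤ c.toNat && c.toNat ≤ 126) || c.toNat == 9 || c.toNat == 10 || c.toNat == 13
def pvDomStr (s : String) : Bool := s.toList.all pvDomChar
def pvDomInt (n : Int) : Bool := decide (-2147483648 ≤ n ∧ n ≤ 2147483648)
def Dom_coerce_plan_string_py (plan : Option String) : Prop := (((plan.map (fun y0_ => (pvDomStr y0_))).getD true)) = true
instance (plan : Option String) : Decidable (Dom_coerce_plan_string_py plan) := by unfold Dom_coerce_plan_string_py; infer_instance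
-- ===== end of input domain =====

-- B replaces A's five sequential str.replace passes with one character-filtering pass (simpler, one traversal).
-- A raises ValueError on None and on plans that are all separators; Pre_ excludes exactly those inputs.


-- ===== PORT A =====
-- the tuple (' ', ',', '+', '-', '_') of A's loop, as one-character strings
def pvSepStrs : List String := [" ", ",", "+", "-", "_"]

-- A: None raises (excluded by Pre_); upper; five replace passes; empty raises (excluded by Pre_,
-- and the returned value at that point would be "" anyway).
def coerce_plan_string_py (plan : Option String) : String :=
  match plan with
  | none => ""     -- Python raises ValueError here; outside Pre_
  | some s =>
    let p := PySem.Str.upper s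
    pvSepStrs.foldl (fun q sep => PySem.Str.replace q sep "") p
    -- Python's final 'if not plan: raise' is outside Pre_; at that point the value is "" either way

-- ===== PORT B =====
def pvSepChars : List Char := [' ', ',', '+', '-', '_']

-- B: one filtering pass over the uppercased characters.
def coerce_plan_string_py_alt (plan : Option String) : String :=
  match plan with
  | none => ""     -- Python raises ValueError here; outside Pre_
  | some s =>
    String.ofList (((PySem.Str.upper s).toList).filter (fun ch => !(pvSepChars.contains ch)))

-- ===== PRECONDITION & SPEC =====
-- Pre_ excludes exactly the inputs on which Python A raises ValueError: None, and strings whose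
-- characters are all separators (the result would be empty).
def Pre_coerce_plan_string_py (plan : Option String) : Prop :=
  plan ≠ none ∧ ((plan.getD "").toList.any (fun c => !(pvSepChars.contains c))) = true
instance (plan : Option String) : Decidable (Pre_coerce_plan_string_py plan) := by
  unfold Pre_coerce_plan_string_py; infer_instance

def pvWitness_coerce_plan_string_py : Option String := some "a f"

def Spec_coerce_plan_string_py (plan : Option String) (out : String) : Prop := out = coerce_plan_string_py_alt plan
instance (plan : Option String) (out : String) : Decidable (Spec_coerce_plan_string_py plan out) := by unfold Spec_coerce_plan_string_py; infer_instance

-- ===== CLAIM (what is proved, stated in full; the proofs are below) =====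
def Claim_equal_coerce_plan_string_py : Prop := ∀ (plan : Option String), Dom_coerce_plan_string_py plan → Pre_coerce_plan_string_py plan → Spec_coerce_plan_string_py plan (coerce_plan_string_py plan)

-- ===== LEMMAS AND PROOFS =====

-- replace.go for a one-character pattern and empty replacement is a filter (given enough fuel)
theorem pv_replace_go_single (c : Char) :
    ∀ (fuel : Nat) (l acc : List Char), l.length ≤ fuel →
      PySem.Chars.replace.go [c] [] fuel l acc = acc.reverse ++ l.filter (fun x => x ≠ c) := by
  intro fuel
  induction fuel with
  | zero =>
    intro l acc h
    have : l = [] := List.eq_nil_of_length_eq_zero (Nat.le_zero.mp h)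
    subst this
    simp [PySem.Chars.replace.go]
  | succ n ih =>
    intro l acc h
    cases l with
    | nil => simp [PySem.Chars.replace.go]
    | cons x t =>
      by_cases hx : x = c
      · subst hx
        have hpre : List.isPrefixOf [x] (x :: t) = true := by simp [List.isPrefixOf]
        rw [PySem.Chars.replace.go, if_pos hpre]
        simp only [List.length_cons] at h
        simpa using ih t acc (Nat.le_of_succ_le_succ h)
      · have hpre : List.isPrefixOf [c] (x :: t) = false := by
          simp [List.isPrefixOf]; exact fun h' => (hx h'.symm).elim
        rw [PySem.Chars.replace.go, if_neg (by simp [hpre])]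
        simp only [List.length_cons] at h
        rw [ih t (x :: acc) (Nat.le_of_succ_le_succ h)]
        simp [hx]

theorem pv_replace_single (c : Char) (l : List Char) :
    PySem.Chars.replace l [c] [] = l.filter (fun x => x ≠ c) := by
  rw [PySem.Chars.replace, if_neg (by simp)]
  exact pv_replace_go_single c l.length l [] (le_refl _)

-- one Str.replace pass with a one-character separator, on toList
theorem pv_step_toList (q : String) (c : Char) :
    (PySem.Str.replace q (String.ofList [c]) "").toList = q.toList.filter (fun x => x ≠ c) := by
  rw [PySem.Str.toList_replace]
  simpa using pv_replace_single c q.toList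

-- ===== VERDICT (by name: the statement is the Claim_ definition above) =====
theorem coerce_plan_string_py_spec : Claim_equal_coerce_plan_string_py := by
  intro plan _ hpre
  unfold Spec_coerce_plan_string_py
  obtain ⟨hne, _⟩ := hpre
  cases plan with
  | none => exact absurd rfl hne
  | some s =>
    unfold coerce_plan_string_py coerce_plan_string_py_alt pvSepStrs
    apply String.ext   -- both sides via toList
    simp only [List.foldl_cons, List.foldl_nil]
    have h1 : (" " : String) = String.ofList [' '] := rfl
    have h2 : ("," : String) = String.ofList [','] := rfl
    have h3 : ("+" : String) = String.ofList ['+'] := rfl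
    have h4 : ("-" : String) = String.ofList ['-'] := rfl
    have h5 : ("_" : String) = String.ofList ['_'] := rfl
    rw [h1, h2, h3, h4, h5]
    -- peel the five replace passes into five filters
    -- (need toList of the whole chain)
    have key : ∀ (q : String),
        (PySem.Str.replace (PySem.Str.replace (PySem.Str.replace (PySem.Str.replace
          (PySem.Str.replace q (String.ofList [' ']) "") (String.ofList [',']) "") (String.ofList ['+']) "")
          (String.ofList ['-']) "") (String.ofList ['_']) "").toList
        = q.toList.filter (fun ch => !(pvSepChars.contains ch)) := by
      intro q
      rw [pv_step_toList, pv_step_toList, pv_step_toList, pv_step_toList, pv_step_toList]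
      simp only [List.filter_filter]
      apply List.filter_congr
      intro a _
      by_cases e1 : a = ' ' <;> by_cases e2 : a = ',' <;> by_cases e3 : a = '+' <;>
        by_cases e4 : a = '-' <;> by_cases e5 : a = '_' <;>
        simp_all [pvSepChars]
    rw [key]
    simp
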